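-- pv_equiv track=rewrite | github.com/csraea/kod | gamma.py | recursive_elias
-- ===== SOURCE A (Python) =====
-- def recursive_elias(n): #get elias integer code recursively
--     s = ""
--     if n>1:
--         b = bin(n)[2:]
--         stringb = str(b)
--         b = stringb.replace("1","0",1)
--         s += recursive_elias(len(b)-1) + b
--
--     if n == 1:
--         s+= "0"
--     return s
-- ===== SOURCE B (Python) =====
-- def recursive_elias(n):  # iterative encoder extracting bits arithmetically (no bin()/string slicing)
--     if n == 1:
--         return "0"
--     if n <= 0:
--         return ""
--     pieces = []
--     while n > 1:
--         bits = []
--         m = n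
--         while m > 1:          # pull bits of n LSB-first by arithmetic
--             bits.append("01"[m % 2])
--             m //= 2
--         bits.append("0")      # the leading 1-bit, flipped to '0' as the code requires
--         pieces.append("".join(reversed(bits)))
--         n = len(bits) - 1
--     return "0" + "".join(reversed(pieces))
-- ===== Notes on version B (the rewrite author's own statement) =====
-- stated objective: alternative
-- what changed: The string recursion f(n)=f(len(bin(n))-1)+bin(n).replace('1','0',1) is replaced by a flat while-loop that extracts each code piece arithmetically (m%2, m//=2) bit by bit, with no bin()/slicing/replace, and joins the collected pieces in reversed order.
import Mathlib
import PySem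

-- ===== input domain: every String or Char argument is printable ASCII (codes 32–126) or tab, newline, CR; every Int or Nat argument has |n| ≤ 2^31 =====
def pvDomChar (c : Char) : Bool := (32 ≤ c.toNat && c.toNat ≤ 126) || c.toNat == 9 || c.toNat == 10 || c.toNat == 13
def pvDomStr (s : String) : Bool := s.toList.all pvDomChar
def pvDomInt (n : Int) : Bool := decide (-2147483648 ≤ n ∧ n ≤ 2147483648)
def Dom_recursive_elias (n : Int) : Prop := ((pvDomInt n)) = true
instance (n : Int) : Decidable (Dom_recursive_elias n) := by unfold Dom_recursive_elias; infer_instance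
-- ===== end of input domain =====

-- B replaces the string recursion (bin(), slicing, replace) by a flat loop that extracts each
-- code piece arithmetically bit by bit (m%2, m//=2) and joins the pieces reversed (objective: alternative).

-- ===== PORT A =====

-- hand-port of `s.replace("1","0",1)` for single-char old/new and count=1 (PySem.Str.replace has no count);
-- exact: replaces the first occurrence only
def replaceOnce (old new : Char) : List Char → List Char
  | [] => []
  | c :: cs => if c = old then new :: cs else c :: replaceOnce old new cs

-- reference binary representation, used only to prove the termination bound the port cites
def myBin (n : Nat) : List Char :=
  if n < 2 then [Nat.digitChar n] else myBin (n / 2) ++ [Nat.digitChar (n % 2)]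
decreasing_by exact Nat.div_lt_self (by omega) (by omega)

theorem myBin_base (n : Nat) (h : n < 2) : myBin n = [Nat.digitChar n] := by
  rw [myBin]; exact if_pos h

theorem myBin_step (n : Nat) (h : ¬ n < 2) :
    myBin n = myBin (n / 2) ++ [Nat.digitChar (n % 2)] := by
  rw [myBin]; rw [if_neg h]

theorem toDigitsCore_eq_myBin (f : Nat) : ∀ (n : Nat) (acc : List Char), n < f →
    Nat.toDigitsCore 2 f n acc = myBin n ++ acc := by
  induction f with
  | zero => intro n acc h; omega
  | succ f ih =>
    intro n acc h
    rw [Nat.toDigitsCore]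
    by_cases h2 : n < 2
    · have h0 : n / 2 = 0 := by omega
      have hm : n % 2 = n := Nat.mod_eq_of_lt h2
      simp [h0, myBin_base n h2, hm]
    · have hd : ¬ n / 2 = 0 := by omega
      simp only [hd, if_false]
      rw [ih (n / 2) _ (by omega), myBin_step n h2]
      simp

theorem toDigits_two_eq_myBin (n : Nat) : Nat.toDigits 2 n = myBin n := by
  unfold Nat.toDigits
  simpa using toDigitsCore_eq_myBin (n + 1) n [] (by omega)

theorem myBin_len_pos (n : Nat) : 1 ≤ (myBin n).length := by
  induction n using Nat.strong_induction_on with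
  | _ n ih =>
    by_cases h : n < 2
    · rw [myBin_base n h]; simp
    · rw [myBin_step n h]; simp

theorem myBin_len_le (n : Nat) (h : 1 ≤ n) : (myBin n).length ≤ n := by
  induction n using Nat.strong_induction_on with
  | _ n ih =>
    by_cases h2 : n < 2
    · rw [myBin_base n h2]
      simp only [List.length_cons, List.length_nil]
      omega
    · rw [myBin_step n h2]
      have := ih (n / 2) (Nat.div_lt_self (by omega) (by omega)) (by omega)
      simp only [List.length_append, List.length_cons, List.length_nil]
      omega

theorem replaceOnce_length (old new : Char) (l : List Char) :
    (replaceOnce old new l).length = l.length := by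
  induction l with
  | nil => rfl
  | cons c cs ih => simp only [replaceOnce]; split <;> simp [ih]

-- bin(n)[2:] for n ≥ 1, characterised
theorem sliceBin (n : Int) (h : 1 ≤ n) :
    PySem.List.slice (PySem.Int.toBinChars0b n) (some 2) none = myBin n.toNat := by
  unfold PySem.Int.toBinChars0b
  rw [if_neg (by omega), PySem.List.slice_from _ (by norm_num : (0:Int) ≤ 2)]
  rw [toDigits_two_eq_myBin]
  rfl

theorem elias_dec (n : Int) (h : 1 < n) :
    ((((replaceOnce '1' '0'
        (PySem.List.slice (PySem.Int.toBinChars0b n) (some 2) none)).length : Int) - 1)).toNat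
      < n.toNat := by
  rw [replaceOnce_length, sliceBin n (by omega)]
  have h1 := myBin_len_le n.toNat (by omega)
  have h2 := myBin_len_pos n.toNat
  omega

-- literal port of A's recursion, at the List Char level; `recursive_elias` wraps it into String
def eliasAChars (n : Int) : List Char :=
  let s : List Char := []
  if h : 1 < n then
    let b := PySem.List.slice (PySem.Int.toBinChars0b n) (some 2) none
    let b := replaceOnce '1' '0' b
    let s := s ++ eliasAChars ((b.length : Int) - 1) ++ b
    if n = 1 then s ++ ['0'] else s
  else
    if n = 1 then s ++ ['0'] else s
termination_by n.toNat
decreasing_by exact elias_dec n h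

def recursive_elias (n : Int) : String := String.ofList (eliasAChars n)

-- ===== PORT B =====

-- the inner `while m > 1` loop of Source B: the bits of m below its top bit, LSB first
def lsbBits (m : Nat) : List Char :=
  if 1 < m then (if m % 2 = 1 then '1' else '0') :: lsbBits (m / 2) else []
decreasing_by exact Nat.div_lt_self (by omega) (by omega)

theorem lsbBits_base (m : Nat) (h : ¬ 1 < m) : lsbBits m = [] := by
  rw [lsbBits]; exact if_neg h

theorem lsbBits_step (m : Nat) (h : 1 < m) :
    lsbBits m = (if m % 2 = 1 then '1' else '0') :: lsbBits (m / 2) := by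
  conv_lhs => rw [lsbBits]
  rw [if_pos h]

-- termination bound the outer loop cites
theorem lsbBits_len_lt (m : Nat) (h : 1 ≤ m) : (lsbBits m).length < m := by
  induction m using Nat.strong_induction_on with
  | _ m ih =>
    by_cases h2 : 1 < m
    · rw [lsbBits_step m h2]
      have := ih (m / 2) (Nat.div_lt_self (by omega) (by omega)) (by omega)
      simp only [List.length_cons]
      omega
    · rw [lsbBits_base m h2]
      simp only [List.length_nil]
      omega

-- the outer `while n > 1` loop of Source B: bits = lsbBits ++ ['0'], piece = reversed bits,
-- next n = len(bits) - 1
def bLoop (m : Nat) (pieces : List (List Char)) : List (List Char) :=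
  if h : 1 < m then
    bLoop ((lsbBits m ++ ['0']).length - 1) (pieces ++ [(lsbBits m ++ ['0']).reverse])
  else pieces
termination_by m
decreasing_by simpa using lsbBits_len_lt m (by omega)

-- guards of Source B, then "0" + "".join(reversed(pieces))
def recursive_elias_alt (n : Int) : String :=
  if n = 1 then "0"
  else if n ≤ 0 then ""
  else String.ofList (['0'] ++ ((bLoop n.toNat []).reverse).flatten)

-- ===== PRECONDITION & SPEC =====
def Spec_recursive_elias (n : Int) (out : String) : Prop := out = recursive_elias_alt n
instance (n : Int) (out : String) : Decidable (Spec_recursive_elias n out) := by unfold Spec_recursive_elias; infer_instance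

-- ===== CLAIM =====
def Claim_equal_recursive_elias : Prop := ∀ (n : Int), Dom_recursive_elias n → Spec_recursive_elias n (recursive_elias n)

-- ===== LEMMAS AND PROOFS =====

-- the reference binary is the leading '1' followed by the arithmetic bits reversed
theorem myBin_eq_lsb (m : Nat) (h : 1 ≤ m) : myBin m = '1' :: (lsbBits m).reverse := by
  induction m using Nat.strong_induction_on with
  | _ m ih =>
    by_cases h2 : m < 2
    · have h1 : m = 1 := by omega
      subst h1
      rw [myBin_base 1 (by omega), lsbBits_base 1 (by omega)]
      rfl
    · rw [myBin_step m h2, ih (m / 2) (Nat.div_lt_self (by omega) (by omega)) (by omega)]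
      rw [lsbBits_step m (by omega)]
      have hc : Nat.digitChar (m % 2) = (if m % 2 = 1 then '1' else '0') := by
        rcases Nat.mod_two_eq_zero_or_one m with hm | hm <;> rw [hm] <;> rfl
      rw [hc]
      simp

theorem bLoop_step (m : Nat) (ps : List (List Char)) (h : 1 < m) :
    bLoop m ps = bLoop ((lsbBits m ++ ['0']).length - 1) (ps ++ [(lsbBits m ++ ['0']).reverse]) := by
  conv_lhs => rw [bLoop]
  rw [dif_pos h]

theorem bLoop_base (m : Nat) (ps : List (List Char)) (h : ¬ 1 < m) :
    bLoop m ps = ps := by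
  rw [bLoop]; exact dif_neg h

theorem bLoop_append (m : Nat) : ∀ ps : List (List Char),
    bLoop m ps = ps ++ bLoop m [] := by
  induction m using Nat.strong_induction_on with
  | _ m ih =>
    intro ps
    by_cases h : 1 < m
    · have hlt : (lsbBits m ++ ['0']).length - 1 < m := by
        simpa using lsbBits_len_lt m (by omega)
      rw [bLoop_step m ps h, bLoop_step m [] h, ih _ hlt, ih _ hlt ([] ++ _)]
      simp
    · rw [bLoop_base m ps h, bLoop_base m [] h]
      simp

theorem eliasAChars_step (n : Int) (h : 1 < n) :
    eliasAChars n =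
      eliasAChars (((replaceOnce '1' '0'
          (PySem.List.slice (PySem.Int.toBinChars0b n) (some 2) none)).length : Int) - 1)
        ++ replaceOnce '1' '0' (PySem.List.slice (PySem.Int.toBinChars0b n) (some 2) none) := by
  conv_lhs => rw [eliasAChars]
  rw [dif_pos h, if_neg (by omega : ¬ n = 1)]
  simp

theorem eliasAChars_base (n : Int) (h : ¬ 1 < n) :
    eliasAChars n = if n = 1 then ['0'] else [] := by
  conv_lhs => rw [eliasAChars]
  rw [dif_neg h]
  split <;> rfl

theorem elias_main (m : Nat) (h : 1 ≤ m) :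
    eliasAChars (m : Int) = ['0'] ++ ((bLoop m []).reverse).flatten := by
  induction m using Nat.strong_induction_on with
  | _ m ih =>
    by_cases h2 : 1 < m
    · have hm1 : (1 : Int) < (m : Int) := by exact_mod_cast h2
      have hs : PySem.List.slice (PySem.Int.toBinChars0b (m : Int)) (some 2) none
          = myBin m := by
        rw [sliceBin (m : Int) (by exact_mod_cast h), Int.toNat_natCast]
      have hrev := myBin_eq_lsb m h
      -- the two pieces coincide: replaceOnce flips the leading '1'
      have hb : replaceOnce '1' '0' (myBin m) = (lsbBits m ++ ['0']).reverse := by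
        rw [hrev]
        simp [replaceOnce]
      have hlenB : (lsbBits m ++ ['0']).length - 1 = (lsbBits m).length := by simp
      have hlenM : (myBin m).length = (lsbBits m).length + 1 := by
        rw [hrev]; simp
      have hlt : (lsbBits m).length < m := lsbBits_len_lt m (by omega)
      have hge : 1 ≤ (lsbBits m).length := by
        rw [lsbBits_step m h2]
        simp only [List.length_cons]
        omega
      have hcast : ((((lsbBits m ++ ['0']).reverse.length : Nat) : Int) - 1)
          = (((lsbBits m).length : Nat) : Int) := by
        simp
      rw [eliasAChars_step (m : Int) hm1, bLoop_step m [] h2, hs, hb, hcast, hlenB]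
      rw [ih ((lsbBits m).length) hlt hge]
      rw [bLoop_append _ ([] ++ [(lsbBits m ++ ['0']).reverse])]
      simp
    · have hm : m = 1 := by omega
      subst hm
      simp only [Nat.cast_one]
      rw [eliasAChars_base 1 (by omega), bLoop_base 1 [] (by omega)]
      simp

-- ===== VERDICT =====
theorem recursive_elias_spec : Claim_equal_recursive_elias := by
  intro n _
  unfold Spec_recursive_elias recursive_elias recursive_elias_alt
  by_cases h1 : n = 1
  · subst h1
    rw [if_pos rfl, eliasAChars_base 1 (by omega)]
    rfl
  · rw [if_neg h1]
    by_cases h : n ≤ 0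
    · rw [if_pos h, eliasAChars_base n (by omega), if_neg h1]
    · rw [if_neg h]
      have hmain := elias_main n.toNat (by omega)
      have hn : ((n.toNat : Int)) = n := Int.toNat_of_nonneg (by omega)
      rw [hn] at hmain
      rw [hmain]
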